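-- pv_equiv track=rewrite | github.com/ncatallo/adventofcode | 2021/14/main.py | getAnswerStar1
-- ===== SOURCE A (Python) =====
-- def getAnswerStar1(template):
--
--     dict_count = {}
--
--     for char in list(template):
--         if dict_count.get(char, None) is None:
--             dict_count[char] = 1
--         else:
--             dict_count[char] += 1
--
--     max_value = dict_count[max(dict_count, key=dict_count.get)]
--     min_value = dict_count[min(dict_count, key=dict_count.get)]
--
--     return max_value - min_value
-- ===== SOURCE B (Python) =====
-- def getAnswerStar1(template):
--     lengths = []
--     run = 0
--     prev = None
--     for ch in sorted(template):
--         if ch == prev: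
--             run += 1
--         else:
--             if run:
--                 lengths.append(run)
--             prev = ch
--             run = 1
--     if run:
--         lengths.append(run)
--     return max(lengths) - min(lengths)
-- ===== Notes on version B (the rewrite author's own statement) =====
-- stated objective: alternative
-- what changed: Replaces hash-table counting plus two keyed argmax/argmin scans with sort-then-run-length-encode: one grouped pass over the sorted characters collects run lengths, then plain max/min over those lengths.
import Mathlib
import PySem

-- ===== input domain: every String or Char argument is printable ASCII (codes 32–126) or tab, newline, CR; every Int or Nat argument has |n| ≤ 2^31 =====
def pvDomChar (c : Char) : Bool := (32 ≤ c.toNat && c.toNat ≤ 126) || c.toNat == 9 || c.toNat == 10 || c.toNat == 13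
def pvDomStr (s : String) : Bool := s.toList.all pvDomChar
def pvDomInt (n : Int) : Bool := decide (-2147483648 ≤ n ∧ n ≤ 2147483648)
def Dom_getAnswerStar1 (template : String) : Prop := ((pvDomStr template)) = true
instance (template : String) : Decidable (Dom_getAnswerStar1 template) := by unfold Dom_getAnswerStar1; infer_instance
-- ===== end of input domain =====

-- B sorts the characters and run-length-encodes them in one grouped pass, then takes
-- max - min of the run lengths; A hash-counts and does two keyed argmax/argmin scans.

-- ===== PORT A =====
-- dict_count[k] below is ported as getD _ 0: every queried key is in the dict, so exact.
def getAnswerStar1 (template : String) : Int :=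
  let d := template.toList.foldl
    (fun d c =>
      match d.get? c with
      | none => d.insert c (1 : Int)
      | some v => d.insert c (v + 1))
    PySem.Dict.empty
  match PySem.List.max? d.keys (fun c => d.getD c 0),
        PySem.List.min? d.keys (fun c => d.getD c 0) with
  | some kmax, some kmin => d.getD kmax 0 - d.getD kmin 0
  | _, _ => 0   -- unreachable under Pre_ (max()/min() of an empty dict raises ValueError)

-- ===== PORT B =====
-- loop body of Source B: state (lengths, run, prev)
def pvStep (st : List Int × Int × Option Char) (ch : Char) : List Int × Int × Option Char :=
  if some ch = st.2.2 then (st.1, st.2.1 + 1, st.2.2)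
  else ((if st.2.1 ≠ 0 then st.1 ++ [st.2.1] else st.1), 1, some ch)

-- the trailing 'if run: lengths.append(run)' after the loop
def pvFinish (st : List Int × Int × Option Char) : List Int :=
  if st.2.1 ≠ 0 then st.1 ++ [st.2.1] else st.1

def getAnswerStar1_alt (template : String) : Int :=
  let lengths := pvFinish
    ((PySem.List.sorted template.toList (fun c => c) false).foldl pvStep ([], 0, none))
  match PySem.List.max? lengths (fun x => x) with
  | none => 0   -- unreachable under Pre_ (max() of an empty list raises ValueError)
  | some a =>
    match PySem.List.min? lengths (fun x => x) with
    | none => 0   -- unreachable under Pre_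
    | some b => a - b

-- ===== PRECONDITION & SPEC =====
-- On the empty string A's max() over an empty dict raises ValueError (B's max() raises too).
def Pre_getAnswerStar1 (template : String) : Prop := template.toList ≠ []
instance (template : String) : Decidable (Pre_getAnswerStar1 template) := by unfold Pre_getAnswerStar1; infer_instance
def pvWitness_getAnswerStar1 : String := "aabbbc"

def Spec_getAnswerStar1 (template : String) (out : Int) : Prop := out = getAnswerStar1_alt template
instance (template : String) (out : Int) : Decidable (Spec_getAnswerStar1 template out) := by unfold Spec_getAnswerStar1; infer_instance

-- ===== CLAIM (what is proved, stated in full; the proofs are below) =====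
def Claim_equal_getAnswerStar1 : Prop := ∀ (template : String), Dom_getAnswerStar1 template → Pre_getAnswerStar1 template → Spec_getAnswerStar1 template (getAnswerStar1 template)

-- ===== LEMMAS AND PROOFS =====

-- A's loop body is exactly the counter step.
theorem pv_loop_eq_counter (l : List Char) :
    l.foldl
      (fun d c =>
        match d.get? c with
        | none => d.insert c (1 : Int)
        | some v => d.insert c (v + 1))
      PySem.Dict.empty = PySem.Dict.counter l := by
  rw [← PySem.Dict.foldl_insert_getD_add_one_eq_counter]
  congr 1
  funext d c
  cases h : d.get? c with
  | none => simp [PySem.Dict.getD, h]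
  | some v => simp [PySem.Dict.getD, h]

-- value of the first argmax = first maximum of the mapped values
theorem pv_max_key_val {α : Type} (xs : List α) (f : α → Int) (m : α)
    (h : PySem.List.max? xs f = some m) :
    PySem.List.max? (xs.map f) (fun x => x) = some (f m) := by
  have hne : xs ≠ [] := by
    intro he; rw [he] at h; simp [PySem.List.max?] at h
  cases hv : PySem.List.max? (xs.map f) (fun x => x) with
  | none =>
    rw [PySem.List.max?_eq_none_iff _ _] at hv
    exact absurd (List.map_eq_nil_iff.mp hv) hne
  | some v =>
    have hvmem := PySem.List.max?_mem hv
    obtain ⟨y, hy, rfl⟩ := List.mem_map.mp hvmem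
    have h1 : f y ≤ f m := PySem.List.max?_isMax h y hy
    have h2 : f m ≤ f y :=
      PySem.List.max?_isMax hv (f m) (List.mem_map.mpr ⟨m, PySem.List.max?_mem h, rfl⟩)
    exact congrArg some (le_antisymm h2 h1).symm

theorem pv_min_key_val {α : Type} (xs : List α) (f : α → Int) (m : α)
    (h : PySem.List.min? xs f = some m) :
    PySem.List.min? (xs.map f) (fun x => x) = some (f m) := by
  have hne : xs ≠ [] := by
    intro he; rw [he] at h; simp [PySem.List.min?] at h
  cases hv : PySem.List.min? (xs.map f) (fun x => x) with
  | none =>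
    rw [PySem.List.min?_eq_none_iff _ _] at hv
    exact absurd (List.map_eq_nil_iff.mp hv) hne
  | some v =>
    have hvmem := PySem.List.min?_mem hv
    obtain ⟨y, hy, rfl⟩ := List.mem_map.mp hvmem
    have h1 : f m ≤ f y := PySem.List.min?_isMin h y hy
    have h2 : f y ≤ f m :=
      PySem.List.min?_isMin hv (f m) (List.mem_map.mpr ⟨m, PySem.List.min?_mem h, rfl⟩)
    exact congrArg some (le_antisymm h1 h2).symm

-- max/min over id depend only on membership
theorem pv_max_id_congr (xs ys : List Int) (h : ∀ x, x ∈ xs ↔ x ∈ ys) :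
    PySem.List.max? xs (fun x => x) = PySem.List.max? ys (fun x => x) := by
  cases hx : PySem.List.max? xs (fun x => x) with
  | none =>
    rw [PySem.List.max?_eq_none_iff _ _] at hx
    cases hy : PySem.List.max? ys (fun x => x) with
    | none => rfl
    | some b =>
      have := PySem.List.max?_mem hy
      rw [← h] at this; rw [hx] at this; exact absurd this (List.not_mem_nil)
  | some a =>
    cases hy : PySem.List.max? ys (fun x => x) with
    | none =>
      rw [PySem.List.max?_eq_none_iff _ _] at hy
      have := PySem.List.max?_mem hx
      rw [h] at this; rw [hy] at this; exact absurd this (List.not_mem_nil)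
    | some b =>
      have h1 : a ≤ b := PySem.List.max?_isMax hy a ((h a).mp (PySem.List.max?_mem hx))
      have h2 : b ≤ a := PySem.List.max?_isMax hx b ((h b).mpr (PySem.List.max?_mem hy))
      exact congrArg some (le_antisymm h1 h2)

theorem pv_min_id_congr (xs ys : List Int) (h : ∀ x, x ∈ xs ↔ x ∈ ys) :
    PySem.List.min? xs (fun x => x) = PySem.List.min? ys (fun x => x) := by
  cases hx : PySem.List.min? xs (fun x => x) with
  | none =>
    rw [PySem.List.min?_eq_none_iff _ _] at hx
    cases hy : PySem.List.min? ys (fun x => x) with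
    | none => rfl
    | some b =>
      have := PySem.List.min?_mem hy
      rw [← h] at this; rw [hx] at this; exact absurd this (List.not_mem_nil)
  | some a =>
    cases hy : PySem.List.min? ys (fun x => x) with
    | none =>
      rw [PySem.List.min?_eq_none_iff _ _] at hy
      have := PySem.List.min?_mem hx
      rw [h] at this; rw [hy] at this; exact absurd this (List.not_mem_nil)
    | some b =>
      have h1 : b ≤ a := PySem.List.min?_isMin hy a ((h a).mp (PySem.List.min?_mem hx))
      have h2 : a ≤ b := PySem.List.min?_isMin hx b ((h b).mpr (PySem.List.min?_mem hy))
      exact congrArg some (le_antisymm h2 h1)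

-- prefixed lengths pull out of the fold
theorem pv_shift (l : List Char) (L : List Int) (r : Int) (p : Option Char) :
    pvFinish (l.foldl pvStep (L, r, p)) = L ++ pvFinish (l.foldl pvStep ([], r, p)) := by
  induction l generalizing L r p with
  | nil => simp [pvFinish]; split <;> simp
  | cons c t ih =>
    simp only [List.foldl_cons, pvStep]
    by_cases hc : some c = p
    · simp only [hc, if_pos]
      exact ih L (r + 1) p
    · simp only [if_neg hc]
      rw [ih (if r ≠ 0 then L ++ [r] else L) 1 (some c),
          ih (if r ≠ 0 then [] ++ [r] else []) 1 (some c)]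
      split <;> simp

-- a run of the current character just increments the counter
theorem pv_fold_run (n : Nat) (rest : List Char) (r : Int) (c : Char) :
    pvFinish ((List.replicate n c ++ rest).foldl pvStep ([], r, some c)) =
      pvFinish (rest.foldl pvStep ([], r + n, some c)) := by
  induction n generalizing r with
  | zero => simp
  | succ m ih =>
    have hstep : pvStep ([], r, some c) c = ([], r + 1, some c) := by simp [pvStep]
    simp only [List.replicate_succ, List.cons_append, List.foldl_cons, hstep]
    rw [ih (r + 1)]
    have harith : r + 1 + (m : Int) = r + ((m + 1 : Nat) : Int) := by push_cast; ring
    rw [harith]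

-- a sorted cons decomposes into a maximal run plus a strictly larger sorted tail
theorem pv_sorted_decomp (c : Char) (t : List Char)
    (h : (c :: t).Pairwise (fun a b => a ≤ b)) :
    ∃ (n : Nat) (rest : List Char), t = List.replicate n c ++ rest ∧
      (∀ x ∈ rest, c < x) ∧ rest.Pairwise (fun a b => a ≤ b) := by
  induction t with
  | nil => exact ⟨0, [], rfl, by simp, List.Pairwise.nil⟩
  | cons b t2 ih =>
    rcases List.pairwise_cons.mp h with ⟨hcb, hbt⟩
    by_cases hbc : b = c
    · subst hbc
      have h2 : (b :: t2).Pairwise (fun a b => a ≤ b) := by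
        refine List.pairwise_cons.mpr ⟨?_, (List.pairwise_cons.mp hbt).2⟩
        exact fun y hy => hcb y (List.mem_cons_of_mem _ hy)
      obtain ⟨n, rest, ht, hlt, hp⟩ := ih h2
      exact ⟨n + 1, rest, by simp [List.replicate_succ, ht], hlt, hp⟩
    · have hcb' : c < b := lt_of_le_of_ne (hcb b (List.mem_cons_self)) (Ne.symm hbc)
      refine ⟨0, b :: t2, by simp, ?_, hbt⟩
      intro x hx
      rcases List.mem_cons.mp hx with rfl | hx
      · exact hcb'
      · exact lt_of_lt_of_le hcb' ((List.pairwise_cons.mp hbt).1 x hx)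

-- membership in the run-length list of a sorted tail
theorem pv_runs_mem : ∀ (N : Nat) (l : List Char), l.length ≤ N →
    l.Pairwise (fun a b => a ≤ b) → ∀ (r : Int) (c : Char), 0 < r → (∀ x ∈ l, c < x) →
    ∀ x : Int, x ∈ pvFinish (l.foldl pvStep ([], r, some c)) ↔
      x = r ∨ ∃ ch ∈ l, (l.count ch : Int) = x := by
  intro N
  induction N with
  | zero =>
    intro l hlen hp r c hr hlt x
    have hl : l = [] := List.eq_nil_of_length_eq_zero (Nat.le_zero.mp hlen)
    subst hl
    simp [pvFinish, hr.ne']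
  | succ M ih =>
    intro l hlen hp r c hr hlt x
    cases l with
    | nil => simp [pvFinish, hr.ne']
    | cons b t =>
      have hcb : c < b := hlt b List.mem_cons_self
      have hbc : some b ≠ some c := by simp [hcb.ne']
      obtain ⟨n, rest, ht, hrlt, hrp⟩ := pv_sorted_decomp b t hp
      subst ht
      have hbrest : b ∉ rest := fun hmem => lt_irrefl b (hrlt b hmem)
      have hstep : pvStep ([], r, some c) b = ([r], 1, some b) := by
        simp [pvStep, hbc, hr.ne']
      rw [List.foldl_cons, hstep, pv_shift, pv_fold_run]
      have hrestlen : rest.length ≤ M := by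
        have h1 : (List.replicate n b ++ rest).length ≤ M := by simpa using hlen
        simp at h1; omega
      have hmem := ih rest hrestlen hrp (1 + (n : Int)) b (by positivity) hrlt x
      rw [List.mem_append, hmem]
      have hcountb : (((b :: (List.replicate n b ++ rest)).count b : Nat) : Int)
          = 1 + (n : Int) := by
        simp [List.count_cons_self, List.count_append,
          List.count_eq_zero.mpr hbrest]
        ring
      have hcountr : ∀ ch ∈ rest,
          (((b :: (List.replicate n b ++ rest)).count ch : Nat) : Int)
            = (rest.count ch : Int) := by
        intro ch hch
        have hchb : ch ≠ b := (hrlt ch hch).ne'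
        have h : (b :: (List.replicate n b ++ rest)).count ch = rest.count ch := by
          simp [List.count_append, List.count_replicate, Ne.symm hchb]
        exact_mod_cast congrArg (fun k : Nat => (k : Int)) h
      constructor
      · rintro (hx | hx | ⟨ch, hch, hcx⟩)
        · left; simpa using hx
        · right; exact ⟨b, List.mem_cons_self, by rw [hx]; exact hcountb⟩
        · right
          exact ⟨ch, List.mem_cons_of_mem _ (List.mem_append_right _ hch),
            by rw [hcountr ch hch]; exact hcx⟩
      · rintro (hx | ⟨ch, hch, hcx⟩)
        · left; simp [hx]
        · right
          rcases List.mem_cons.mp hch with rfl | hcht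
          · left; rw [← hcx, hcountb]
          · rcases List.mem_append.mp hcht with hrep | hres
            · have : ch = b := List.eq_of_mem_replicate hrep
              subst this; left; rw [← hcx, hcountb]
            · right; exact ⟨ch, hres, by rw [← hcountr ch hres]; exact hcx⟩

-- full run-length list of a sorted list: its members are exactly the character counts
theorem pv_lengths_mem (s : List Char) (hs : s.Pairwise (fun a b => a ≤ b)) (x : Int) :
    x ∈ pvFinish (s.foldl pvStep ([], 0, none)) ↔ ∃ ch ∈ s, (s.count ch : Int) = x := by
  cases s with
  | nil => simp [pvFinish]
  | cons b t =>
    have hstep : pvStep ([], 0, none) b = ([], 1, some b) := by simp [pvStep]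
    obtain ⟨n, rest, ht, hrlt, hrp⟩ := pv_sorted_decomp b t hs
    subst ht
    have hbrest : b ∉ rest := fun hmem => lt_irrefl b (hrlt b hmem)
    rw [List.foldl_cons, hstep, pv_fold_run]
    have hmem := pv_runs_mem rest.length rest le_rfl hrp (1 + (n : Int)) b (by positivity) hrlt x
    rw [hmem]
    have hcountb : (((b :: (List.replicate n b ++ rest)).count b : Nat) : Int)
        = 1 + (n : Int) := by
      simp [List.count_cons_self, List.count_append,
        List.count_eq_zero.mpr hbrest]
      ring
    have hcountr : ∀ ch ∈ rest,
        (((b :: (List.replicate n b ++ rest)).count ch : Nat) : Int)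
          = (rest.count ch : Int) := by
      intro ch hch
      have hchb : ch ≠ b := (hrlt ch hch).ne'
      have h : (b :: (List.replicate n b ++ rest)).count ch = rest.count ch := by
        simp [List.count_append, List.count_replicate, Ne.symm hchb]
      exact_mod_cast congrArg (fun k : Nat => (k : Int)) h
    constructor
    · rintro (hx | ⟨ch, hch, hcx⟩)
      · exact ⟨b, List.mem_cons_self, by rw [hx]; exact hcountb⟩
      · exact ⟨ch, List.mem_cons_of_mem _ (List.mem_append_right _ hch),
          by rw [hcountr ch hch]; exact hcx⟩
    · rintro ⟨ch, hch, hcx⟩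
      rcases List.mem_cons.mp hch with rfl | hcht
      · left; rw [← hcx, hcountb]
      · rcases List.mem_append.mp hcht with hrep | hres
        · have : ch = b := List.eq_of_mem_replicate hrep
          subst this; left; rw [← hcx, hcountb]
        · right; exact ⟨ch, hres, by rw [← hcountr ch hres]; exact hcx⟩

-- ===== VERDICT (by name: the statement is the Claim_ definition above) =====
theorem getAnswerStar1_spec : Claim_equal_getAnswerStar1 := by
  intro template _ hpre
  unfold Spec_getAnswerStar1 getAnswerStar1 getAnswerStar1_alt
  rw [pv_loop_eq_counter]
  simp only [PySem.Dict.keys_counter, ← PySem.List.dedup_eq_ofList, PySem.Dict.getD_counter]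
  set l := template.toList with hl
  set s := PySem.List.sorted l (fun c => c) false with hs
  set f : Char → Int := fun c => (l.count c : Int) with hf
  have hsp : s.Pairwise (fun a b => a ≤ b) := PySem.List.sorted_pairwise l (fun c => c)
  have hperm : s.Perm l := PySem.List.sorted_perm l (fun c => c) false
  have hmemeq : ∀ x : Int, x ∈ pvFinish (s.foldl pvStep ([], 0, none)) ↔
      x ∈ (PySem.List.dedup l).map f := by
    intro x
    rw [pv_lengths_mem s hsp x]
    constructor
    · rintro ⟨ch, hch, hcx⟩
      refine List.mem_map.mpr ⟨ch, (PySem.List.mem_dedup _ _).mpr (hperm.mem_iff.mp hch), ?_⟩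
      show ((l.count ch : Nat) : Int) = x
      rw [← hperm.count_eq]; exact hcx
    · intro hx
      obtain ⟨ch, hch, rfl⟩ := List.mem_map.mp hx
      refine ⟨ch, hperm.mem_iff.mpr ((PySem.List.mem_dedup _ _).mp hch), ?_⟩
      show ((s.count ch : Nat) : Int) = ((l.count ch : Nat) : Int)
      rw [hperm.count_eq]
  have hmax := pv_max_id_congr _ _ hmemeq
  have hmin := pv_min_id_congr _ _ hmemeq
  cases hM : PySem.List.max? (PySem.List.dedup l) f with
  | none =>
    exfalso
    rw [PySem.List.max?_eq_none_iff _ _] at hM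
    cases hcl : l with
    | nil => exact hpre hcl
    | cons a t =>
      have : a ∈ PySem.List.dedup l := (PySem.List.mem_dedup _ _).mpr (by rw [hcl]; simp)
      rw [hM] at this; exact absurd this (List.not_mem_nil)
  | some kmax =>
    cases hm : PySem.List.min? (PySem.List.dedup l) f with
    | none =>
      exfalso
      rw [PySem.List.min?_eq_none_iff _ _] at hm
      cases hcl : l with
      | nil => exact hpre hcl
      | cons a t =>
        have : a ∈ PySem.List.dedup l := (PySem.List.mem_dedup _ _).mpr (by rw [hcl]; simp)
        rw [hm] at this; exact absurd this (List.not_mem_nil)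
    | some kmin =>
      rw [hmax, pv_max_key_val _ _ _ hM, hmin, pv_min_key_val _ _ _ hm]
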